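-- pv_equiv track=rewrite | github.com/ramuering/boj | 프로그래머스/lv0/120876. 겹치는 선분의 길이/겹치는 선분의 길이.py | solution
-- ===== SOURCE A (Python) =====
-- def solution(lines):
--     ans=0
--     chk=[0]*201
--     for i in range(len(lines)):
--         for j in range(lines[i][0],lines[i][1]):
--             chk[j+100]+=1
--     for i in range(len(chk)):
--         if chk[i]>1:
--             ans+=1
--
--
--
--     return ans
-- ===== SOURCE B (Python) =====
-- def solution(lines):
--     # Difference array over cells -100..101 (offset +100): two boundary updates
--     # per segment, then one prefix-sum sweep counting cells covered by >1 segment.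
--     diff = [0] * 202
--     for line in lines:
--         a, b = line[0], line[1]
--         if a < b:
--             diff[a + 100] += 1
--             diff[b + 100] -= 1
--     ans = 0
--     cur = 0
--     for d in diff:
--         cur += d
--         if cur > 1:
--             ans += 1
--     return ans
-- ===== Notes on version B (the rewrite author's own statement) =====
-- stated objective: alternative
-- what changed: Replaces the per-cell fill (marking every integer point of every segment in a 201-cell table) by a difference array with two boundary updates per segment plus a single prefix-sum sweep.
-- outside the precondition, e.g. on solution([[-150, -140], [51, 61]]): A returns 10, B returns 9
import Mathlib
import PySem

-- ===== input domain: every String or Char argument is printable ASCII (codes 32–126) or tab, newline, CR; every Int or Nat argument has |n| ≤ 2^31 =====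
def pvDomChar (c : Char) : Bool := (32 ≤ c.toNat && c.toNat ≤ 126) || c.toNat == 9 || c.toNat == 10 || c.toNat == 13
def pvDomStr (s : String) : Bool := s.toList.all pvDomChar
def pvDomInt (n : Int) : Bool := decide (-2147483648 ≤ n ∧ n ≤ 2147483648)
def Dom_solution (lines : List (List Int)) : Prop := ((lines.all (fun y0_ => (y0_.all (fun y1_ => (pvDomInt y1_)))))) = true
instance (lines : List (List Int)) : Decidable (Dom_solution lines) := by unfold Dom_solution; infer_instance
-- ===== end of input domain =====

-- B replaces A's per-cell fill of every covered integer point by a difference array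
-- (two boundary updates per segment) plus one prefix-sum sweep; objective: alternative.


-- ===== PORT A =====
-- xs[i] += v for 0 ≤ i < len(xs) — exact there; Python wraps a negative index and
-- raises IndexError past the end, both excluded by Pre_solution (this helper no-ops).
def pyAddAt (xs : List Int) (i v : Int) : List Int :=
  if 0 ≤ i then xs.modify i.toNat (· + v) else xs

-- inner loop: for j in range(lines[i][0], lines[i][1]): chk[j+100] += 1
-- (line[0]/line[1] raise IndexError on short rows — excluded by Pre_solution)
def pvStepA (chk : List Int) (line : List Int) : List Int :=
  (PySem.List.pyRange (line.getD 0 0) (line.getD 1 0) 1).foldl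
    (fun c j => pyAddAt c (j + 100) 1) chk

def solution (lines : List (List Int)) : Int :=
  (lines.foldl pvStepA (List.replicate 201 0)).foldl
    (fun ans c => if c > 1 then ans + 1 else ans) 0

-- ===== PORT B =====
def pvStepB (diff : List Int) (line : List Int) : List Int :=
  let a := line.getD 0 0
  let b := line.getD 1 0
  if a < b then pyAddAt (pyAddAt diff (a + 100) 1) (b + 100) (-1) else diff

def solution_alt (lines : List (List Int)) : Int :=
  ((lines.foldl pvStepB (List.replicate 202 0)).foldl
    (fun (p : Int × Int) d =>
      let cur := p.2 + d
      (if cur > 1 then p.1 + 1 else p.1, cur)) (0, 0)).1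

-- ===== PRECONDITION & SPEC =====
-- Pre_ keeps the natural domain of the task: rows with at least two entries (A raises
-- IndexError on shorter rows) and nonempty segments whose cells fit A's 201-cell table
-- (outside it A raises IndexError or silently wraps via Python negative indexing).
def Pre_solution (lines : List (List Int)) : Prop :=
  ∀ l ∈ lines, 2 ≤ l.length ∧
    (l.getD 0 0 < l.getD 1 0 → -100 ≤ l.getD 0 0 ∧ l.getD 1 0 ≤ 101)
instance (lines : List (List Int)) : Decidable (Pre_solution lines) := by
  unfold Pre_solution; infer_instance

def pvWitness_solution : List (List Int) := [[-3, 5], [0, 2]]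

def Spec_solution (lines : List (List Int)) (out : Int) : Prop := out = solution_alt lines
instance (lines : List (List Int)) (out : Int) : Decidable (Spec_solution lines out) := by unfold Spec_solution; infer_instance

-- ===== CLAIM (what is proved, stated in full; the proofs are below) =====
def Claim_equal_solution : Prop := ∀ (lines : List (List Int)), Dom_solution lines → Pre_solution lines → Spec_solution lines (solution lines)

-- ===== LEMMAS AND PROOFS =====

-- sum of the first i cells of the difference array
def pvPrefix (diff : List Int) (i : Nat) : Int := (diff.take i).sum

-- loop invariant tying A's cell table to B's difference array
def pvInv (chk diff : List Int) : Prop :=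
  diff.length = 202 ∧ diff.sum = 0 ∧
    chk = (List.range 201).map (fun i => pvPrefix diff (i + 1))

theorem pyAddAt_length (xs : List Int) (i v : Int) :
    (pyAddAt xs i v).length = xs.length := by
  unfold pyAddAt; split_ifs <;> simp

theorem sum_modify_add (xs : List Int) (n : Nat) (v : Int) (h : n < xs.length) :
    (xs.modify n (· + v)).sum = xs.sum + v := by
  induction xs generalizing n with
  | nil => simp at h
  | cons x t ih =>
    cases n with
    | zero => simp [List.modify]; ring
    | succ m =>
      simp at h
      rw [List.modify_succ_cons, List.sum_cons, List.sum_cons, ih m h]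
      ring

theorem pyAddAt_sum (xs : List Int) (i v : Int) (h0 : 0 ≤ i)
    (h1 : i.toNat < xs.length) :
    (pyAddAt xs i v).sum = xs.sum + v := by
  unfold pyAddAt
  rw [if_pos h0, sum_modify_add _ _ _ h1]

theorem pyAddAt_getD (xs : List Int) (i v : Int) (k : Nat) (h0 : 0 ≤ i)
    (_h1 : i.toNat < xs.length) (hk : k < xs.length) :
    (pyAddAt xs i v).getD k 0 = xs.getD k 0 + (if (k : Int) = i then v else 0) := by
  unfold pyAddAt
  rw [if_pos h0]
  have hk' : k < (xs.modify i.toNat (· + v)).length := by simpa using hk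
  rw [List.getD_eq_getElem _ _ hk', List.getD_eq_getElem _ _ hk,
    List.getElem_modify]
  split_ifs <;> omega

theorem pvPrefix_pyAddAt (xs : List Int) (i v : Int) (m : Nat) (h0 : 0 ≤ i)
    (h1 : i.toNat < xs.length) :
    pvPrefix (pyAddAt xs i v) m = pvPrefix xs m + (if i < (m : Int) then v else 0) := by
  unfold pyAddAt pvPrefix
  rw [if_pos h0, List.take_modify]
  by_cases hm : i.toNat < m
  · have : i.toNat < (xs.take m).length := by simp; omega
    rw [sum_modify_add _ _ _ this, if_pos (by omega)]
  · rw [List.modify_eq_self (by simp; omega), if_neg (by omega), add_zero]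

-- A's inner loop adds 1 to every cell in [a+100, b+100)
theorem innerA_getD (n : Nat) : ∀ (a b : Int) (chk : List Int),
    (b - a).toNat = n → chk.length = 201 → -100 ≤ a → b ≤ 101 →
    ((PySem.List.pyRange a b 1).foldl (fun c j => pyAddAt c (j + 100) 1) chk).length = 201 ∧
    ∀ k : Nat, k < 201 →
      ((PySem.List.pyRange a b 1).foldl (fun c j => pyAddAt c (j + 100) 1) chk).getD k 0
        = chk.getD k 0 + (if a + 100 ≤ (k : Int) ∧ (k : Int) < b + 100 then 1 else 0) := by
  induction n with
  | zero =>
    intro a b chk hn hlen _ _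
    rw [PySem.List.pyRange_one_eq_nil (by omega)]
    refine ⟨by simpa using hlen, fun k hk => ?_⟩
    simp only [List.foldl_nil]
    rw [if_neg (by omega), add_zero]
  | succ m ih =>
    intro a b chk hn hlen ha hb
    have hab : a < b := by omega
    rw [PySem.List.pyRange_one_cons hab, List.foldl_cons]
    have h0 : (0:Int) ≤ a + 100 := by omega
    have h1 : (a + 100).toNat < chk.length := by omega
    obtain ⟨hL, hG⟩ := ih (a + 1) b (pyAddAt chk (a + 100) 1) (by omega)
      (by rw [pyAddAt_length]; exact hlen) (by omega) hb
    refine ⟨hL, fun k hk => ?_⟩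
    rw [hG k hk, pyAddAt_getD chk (a + 100) 1 k h0 h1 (by omega)]
    split_ifs <;> omega

theorem inv_step (chk diff : List Int) (l : List Int)
    (hpre : l.getD 0 0 < l.getD 1 0 → -100 ≤ l.getD 0 0 ∧ l.getD 1 0 ≤ 101)
    (hinv : pvInv chk diff) : pvInv (pvStepA chk l) (pvStepB diff l) := by
  obtain ⟨hdl, hds, hchk⟩ := hinv
  set a := l.getD 0 0 with ha'
  set b := l.getD 1 0 with hb'
  have hclen : chk.length = 201 := by rw [hchk]; simp
  have hstepA : pvStepA chk l
      = (PySem.List.pyRange a b 1).foldl (fun c j => pyAddAt c (j + 100) 1) chk := rfl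
  by_cases hab : a < b
  · obtain ⟨hlo, hhi⟩ := hpre hab
    have h0a : (0:Int) ≤ a + 100 := by omega
    have h1a : (a + 100).toNat < diff.length := by omega
    have h0b : (0:Int) ≤ b + 100 := by omega
    have h1b : (b + 100).toNat < (pyAddAt diff (a + 100) 1).length := by
      rw [pyAddAt_length]; omega
    have hstepB : pvStepB diff l = pyAddAt (pyAddAt diff (a + 100) 1) (b + 100) (-1) := by
      unfold pvStepB; rw [← ha', ← hb', if_pos hab]
    rw [hstepA, hstepB]
    obtain ⟨hL, hG⟩ := innerA_getD (b - a).toNat a b chk rfl hclen hlo hhi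
    refine ⟨by rw [pyAddAt_length, pyAddAt_length]; exact hdl, ?_, ?_⟩
    · rw [pyAddAt_sum _ _ _ h0b h1b, pyAddAt_sum _ _ _ h0a h1a, hds]; ring
    · apply List.ext_getElem (by simpa using hL)
      intro k hk1 hk2
      have hk : k < 201 := by omega
      have hGk := hG k hk
      rw [List.getD_eq_getElem _ _ hk1, List.getD_eq_getElem _ _ (by omega)] at hGk
      rw [hGk]
      have hmap : chk[k]'(by omega) = pvPrefix diff (k + 1) := by
        rw [List.getElem_of_eq hchk]; simp
      rw [hmap]
      have hp1 : pvPrefix (pyAddAt (pyAddAt diff (a + 100) 1) (b + 100) (-1)) (k + 1)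
          = pvPrefix (pyAddAt diff (a + 100) 1) (k + 1)
            + (if b + 100 < ((k + 1 : Nat) : Int) then (-1) else 0) :=
        pvPrefix_pyAddAt _ _ _ _ h0b h1b
      have hp2 : pvPrefix (pyAddAt diff (a + 100) 1) (k + 1)
          = pvPrefix diff (k + 1) + (if a + 100 < ((k + 1 : Nat) : Int) then 1 else 0) :=
        pvPrefix_pyAddAt _ _ _ _ h0a h1a
      simp only [List.getElem_map, List.getElem_range, hp1, hp2]
      push_cast
      split_ifs <;> omega
  · have hstepB : pvStepB diff l = diff := by
      unfold pvStepB; rw [← ha', ← hb', if_neg hab]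
    rw [hstepA, hstepB, PySem.List.pyRange_one_eq_nil (by omega), List.foldl_nil]
    exact ⟨hdl, hds, hchk⟩

theorem inv_fold : ∀ (lines : List (List Int)) (chk diff : List Int),
    Pre_solution lines → pvInv chk diff →
    pvInv (lines.foldl pvStepA chk) (lines.foldl pvStepB diff) := by
  intro lines
  induction lines with
  | nil => intro chk diff _ h; simpa using h
  | cons l t ih =>
    intro chk diff hpre hinv
    simp only [List.foldl_cons]
    exact ih _ _ (fun x hx => hpre x (List.mem_cons_of_mem l hx))
      (inv_step chk diff l (hpre l (List.mem_cons_self)).2 hinv)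

theorem pvInv_init : pvInv (List.replicate 201 0) (List.replicate 202 0) := by
  refine ⟨by simp only [List.length_replicate], ?_, ?_⟩
  · simp only [List.sum_replicate, smul_zero]
  apply List.ext_getElem
    (by simp only [List.length_replicate, List.length_map, List.length_range])
  intro k hk1 hk2
  simp only [List.getElem_replicate, List.getElem_map, pvPrefix,
    List.take_replicate, List.sum_replicate, smul_zero]

-- B's sweep counts prefix sums that exceed 1
theorem sweep_eq : ∀ (ds : List Int) (a0 c0 : Int),
    (ds.foldl (fun (p : Int × Int) d =>
      let cur := p.2 + d
      (if cur > 1 then p.1 + 1 else p.1, cur)) (a0, c0)).1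
    = a0 + ((List.range ds.length).countP
        (fun k => decide (c0 + pvPrefix ds (k + 1) > 1)) : Int) := by
  intro ds
  induction ds with
  | nil => intro a0 c0; simp
  | cons d t ih =>
    intro a0 c0
    dsimp only
    simp only [List.foldl_cons, List.length_cons, List.range_succ_eq_map,
      List.countP_cons, List.countP_map]
    rw [ih]
    have hpfx : ∀ k : Nat, pvPrefix (d :: t) (k + 1 + 1) = d + pvPrefix t (k + 1) := by
      intro k; simp [pvPrefix]
    have hcp : (List.countP ((fun k => decide (c0 + pvPrefix (d :: t) (k + 1) > 1)) ∘ Nat.succ)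
        (List.range t.length))
        = List.countP (fun k => decide ((c0 + d) + pvPrefix t (k + 1) > 1)) (List.range t.length) := by
      apply List.countP_congr
      intro k _
      simp only [Function.comp, Nat.succ_eq_add_one, hpfx k]
      constructor <;> intro h <;> simp_all <;> omega
    rw [hcp]
    have h1 : pvPrefix (d :: t) (0 + 1) = d := by simp [pvPrefix]
    rw [h1]
    by_cases hc : c0 + d > 1 <;> simp [hc] <;> push_cast <;> ring

-- ===== VERDICT (by name: the statement is the Claim_ definition above) =====
theorem solution_spec : Claim_equal_solution := by
  intro lines _ hpre
  unfold Spec_solution solution solution_alt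
  obtain ⟨hdl, hds, hchk⟩ := inv_fold lines _ _ hpre pvInv_init
  set diff := lines.foldl pvStepB (List.replicate 202 0) with hdiff
  rw [hchk]
  rw [show (fun (ans c : Int) => if c > 1 then ans + 1 else ans)
        = (fun (ans c : Int) => if (fun c : Int => decide (c > 1)) c = true then ans + 1 else ans) by
      funext ans c; simp]
  rw [PySem.List.foldl_count_if (p := fun c : Int => decide (c > 1))]
  rw [sweep_eq diff 0 0]
  simp only [List.countP_map, hdl, zero_add]
  congr 1
  have h202 : List.range 202 = List.range 201 ++ [201] := List.range_succ
  rw [h202, List.countP_append]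
  have hlast : List.countP (fun k => decide (pvPrefix diff (k + 1) > 1)) [201] = 0 := by
    have : pvPrefix diff 202 = diff.sum := by
      unfold pvPrefix; rw [List.take_of_length_le (by omega)]
    simp [List.countP, List.countP.go, this, hds]
  rw [hlast, Nat.add_zero]
  apply List.countP_congr
  intro k hk
  simp
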